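-- pv_equiv track=rewrite | github.com/tsukusho/shinkan | main.py | parse_section_data
-- ===== SOURCE A (Python) =====
-- def parse_section_data(section):
--     """3C分析セクションのテキストからデータを抽出する"""
--     lines = section.strip().split('\n')
--     data = {}
--     current_key = None
--     current_value = []
--
--     for line in lines[1:]:  # 最初の行（セクションタイトル）をスキップ
--         if line.strip() and ':' in line:
--             # 新しいキーが見つかった場合、前のデータを保存
--             if current_key:
--                 data[current_key] = '\n'.join(current_value)
--
--             # 新しいキーと値の開始
--             key, value = line.split(':', 1)
--             current_key = key.strip().lower().replace(' ', '_')
--             current_value = [value.strip()]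
--         elif line.strip():
--             # 既存の値に追加
--             if current_key:
--                 current_value.append(line.strip())
--
--     # 最後のデータを保存
--     if current_key:
--         data[current_key] = '\n'.join(current_value)
--
--     return data
-- ===== SOURCE B (Python) =====
-- def parse_section_data(section):
--     """Recursive descent over blocks: skip to each key line, consume its whole
--     continuation block with slicing, recurse on the remainder; build the dict last."""
--     def is_key(line):
--         return bool(line.strip()) and ':' in line
--
--     def blocks(ls):
--         while ls and not is_key(ls[0]):
--             ls = ls[1:]
--         if not ls:
--             return []
--         key, value = ls[0].split(':', 1)
--         rest = ls[1:]
--         n = 0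
--         while n < len(rest) and not is_key(rest[n]):
--             n += 1
--         cont = [l.strip() for l in rest[:n] if l.strip()]
--         entry = (key.strip().lower().replace(' ', '_'), '\n'.join([value.strip()] + cont))
--         return [entry] + blocks(rest[n:])
--
--     lines = section.strip().split('\n')
--     return {k: v for k, v in blocks(lines[1:]) if k}
-- ===== Notes on version B (the rewrite author's own statement) =====
-- stated objective: alternative
-- what changed: Replaces A's single-pass flush-on-boundary state machine (dict plus current_key/current_value mutated per line) with recursive descent over blocks: skip to the next key line, slice off that block's continuation lines wholesale, recurse on the remainder, and build the dict in a final comprehension.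
import Mathlib
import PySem

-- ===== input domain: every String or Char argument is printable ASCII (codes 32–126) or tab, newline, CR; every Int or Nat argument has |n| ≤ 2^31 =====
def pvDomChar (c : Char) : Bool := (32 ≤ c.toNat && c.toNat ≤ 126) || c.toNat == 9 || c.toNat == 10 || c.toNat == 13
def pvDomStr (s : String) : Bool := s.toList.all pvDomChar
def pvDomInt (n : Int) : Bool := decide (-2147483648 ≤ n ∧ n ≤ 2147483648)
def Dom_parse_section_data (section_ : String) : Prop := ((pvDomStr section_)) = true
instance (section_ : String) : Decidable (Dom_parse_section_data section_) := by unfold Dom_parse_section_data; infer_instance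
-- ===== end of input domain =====

-- B replaces A's flush-on-boundary state machine with recursive descent over blocks (objective: alternative; same cost).

-- line.strip() and ':' in line — the key-line test both Pythons contain
def pvIsKey (line : String) : Bool :=
  (PySem.Str.strip line != "") && PySem.Str.isIn ":" line

-- key.strip().lower().replace(' ', '_') — the identical normalization expression both Pythons contain
def pvNormKey (k : String) : String :=
  PySem.Str.replace (PySem.Str.lower (PySem.Str.strip k)) " " "_"

-- ===== PORT A =====
-- the duplicated 'if current_key: data[current_key] = "\n".join(current_value)' flush of A
def pvFlushA (data : PySem.Dict String String) (ck : Option String) (cv : List String) :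
    PySem.Dict String String :=
  match ck with
  | some k => if k != "" then data.insert k (PySem.Str.join "\n" cv) else data
  | none => data

-- one iteration of A's for-loop over (data, current_key, current_value)
def pvStepA (st : PySem.Dict String String × Option String × List String) (line : String) :
    PySem.Dict String String × Option String × List String :=
  let (data, ck, cv) := st
  if pvIsKey line then
    match PySem.Str.splitMax? line ":" 1 with
    | some (key :: value :: _) =>
        (pvFlushA data ck cv, some (pvNormKey key), [PySem.Str.strip value])
    | _ => st  -- unreachable: split(':', 1) with ':' in line yields two pieces
  else if PySem.Str.strip line != "" then
    match ck with
    | some k => if k != "" then (data, ck, cv ++ [PySem.Str.strip line]) else st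
    | none => st
  else st

def parse_section_data (section_ : String) : List (String × String) :=
  let lines := (PySem.Str.split? (PySem.Str.strip section_) "\n").getD []  -- sep ≠ "", always some
  let fin := (lines.drop 1).foldl pvStepA (PySem.Dict.mk [], none, [])
  (pvFlushA fin.1 fin.2.1 fin.2.2).items

-- ===== PORT B =====
-- B's recursive blocks(ls): the skip loop 'while ls and not is_key(ls[0]): ls = ls[1:]'
-- is the else-branch recursion; a block's continuation lines rest[:n] / rest[n:] are
-- takeWhile / dropWhile of the non-key-line predicate
def pvBlocks : List String → List (String × String)
  | [] => []
  | l :: rest =>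
    if pvIsKey l then
      match PySem.Str.splitMax? l ":" 1 with
      | some (key :: value :: _) =>
        (pvNormKey key, PySem.Str.join "\n" ([PySem.Str.strip value] ++
            ((rest.takeWhile (fun l => !pvIsKey l)).filter
              (fun l => PySem.Str.strip l != "")).map PySem.Str.strip)) ::
          pvBlocks (rest.dropWhile (fun l => !pvIsKey l))
      | _ => []  -- unreachable: split(':', 1) with ':' in line yields two pieces
    else pvBlocks rest
termination_by ls => ls.length
decreasing_by
  · have h1 := (List.dropWhile_sublist (p := fun l => !pvIsKey l) (l := rest)).length_le
    simp; omega
  · simp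

-- the final dict comprehension {k: v for k, v in blocks(lines[1:]) if k}
def parse_section_data_alt (section_ : String) : List (String × String) :=
  let lines := (PySem.Str.split? (PySem.Str.strip section_) "\n").getD []
  (((pvBlocks (lines.drop 1)).filter (fun p => p.1 != "")).foldl
    (fun d p => d.insert p.1 p.2) (PySem.Dict.mk [])).items

-- ===== PRECONDITION & SPEC =====
def Spec_parse_section_data (section_ : String) (out : List (String × String)) : Prop := out = parse_section_data_alt section_
instance (section_ : String) (out : List (String × String)) : Decidable (Spec_parse_section_data section_ out) := by unfold Spec_parse_section_data; infer_instance

-- ===== CLAIM (what is proved, stated in full; the proofs are below) =====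
def Claim_equal_parse_section_data : Prop := ∀ (section_ : String), Dom_parse_section_data section_ → Spec_parse_section_data section_ (parse_section_data section_)

-- ===== LEMMAS AND PROOFS =====

-- s.split(':', 1) with maxsplit exhausted copies the remainder into the last piece
theorem pvGo_zero (fuel : Nat) (l cur : List Char) (acc : List (List Char)) :
    PySem.Chars.splitOnMax.go [':'] fuel 0 l cur acc = ((cur.reverse ++ l) :: acc).reverse := by
  cases fuel <;> cases l <;> simp [PySem.Chars.splitOnMax.go]

theorem pvGo_shape (fuel : Nat) : ∀ (l cur : List Char), l.length < fuel → ':' ∈ l →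
    ∃ a b, PySem.Chars.splitOnMax.go [':'] fuel 1 l cur [] = [a, b] := by
  induction fuel with
  | zero => intro l cur h _; omega
  | succ f ih =>
    intro l cur h hm
    cases l with
    | nil => simp at hm
    | cons c rest =>
      by_cases hp : [':'].isPrefixOf (c :: rest) = true
      · rw [PySem.Chars.splitOnMax.go]
        simp only [hp, if_true, if_neg (by omega : ¬ (1 : Nat) = 0)]
        rw [pvGo_zero]
        exact ⟨_, _, rfl⟩
      · have hc : c ≠ ':' := by
          intro hc; subst hc; simp [List.isPrefixOf] at hp
        have hm' : ':' ∈ rest := by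
          rcases List.mem_cons.mp hm with h | h
          · exact absurd h.symm hc
          · exact h
        rw [PySem.Chars.splitOnMax.go]
        simp only [hp, if_neg (by omega : ¬ (1 : Nat) = 0)]
        exact ih rest (c :: cur) (by simp at h; omega) hm'

-- s.split(':', 1) always yields exactly two pieces when ':' occurs in s
theorem pvSplit_shape (l : String) (h : pvIsKey l = true) :
    ∃ a b, PySem.Str.splitMax? l ":" 1 = some [a, b] := by
  have hin : PySem.Str.isIn ":" l = true := by
    simp [pvIsKey, Bool.and_eq_true] at h; exact h.2
  have hinf : (":".toList) <:+: l.toList := (PySem.Str.isIn_iff_infix _ _).mp hin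
  have hmem : ':' ∈ l.toList :=
    List.singleton_sublist.mp (by simpa using hinf.sublist)
  obtain ⟨a, b, hab⟩ :=
    pvGo_shape (l.toList.length + 1) l.toList [] (Nat.lt_succ_self _) hmem
  refine ⟨String.ofList a, String.ofList b, ?_⟩
  simp only [PySem.Str.splitMax?, PySem.Chars.splitMax?, PySem.Chars.splitOnMax]
  simp at hab ⊢
  simp [hab]

-- the stripped non-empty lines of a block, in order: [l.strip() for l in xs if l.strip()]
def pvStrips (xs : List String) : List String :=
  (xs.filter (fun l => PySem.Str.strip l != "")).map PySem.Str.strip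

-- 'if k: d[k] = "\n".join(vs)' as a function
def pvFlush' (d : PySem.Dict String String) (k : String) (vs : List String) :
    PySem.Dict String String :=
  if k != "" then d.insert k (PySem.Str.join "\n" vs) else d

-- inserting the blocks with non-empty keys in order
def pvApply (d : PySem.Dict String String) (bs : List (String × String)) :
    PySem.Dict String String :=
  bs.foldl (fun d p => if p.1 != "" then d.insert p.1 p.2 else d) d

-- A's loop followed by its final flush
def pvRunA (ls : List String) (st : PySem.Dict String String × Option String × List String) :
    PySem.Dict String String :=
  pvFlushA (ls.foldl pvStepA st).1 (ls.foldl pvStepA st).2.1 (ls.foldl pvStepA st).2.2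

theorem pvApply_filter : ∀ (bs : List (String × String)) (d : PySem.Dict String String),
    (bs.filter (fun p => p.1 != "")).foldl (fun d p => d.insert p.1 p.2) d = pvApply d bs
  | [], d => rfl
  | b :: t, d => by
    unfold pvApply
    rw [List.foldl_cons, List.filter_cons]
    by_cases hb : (b.1 != "") = true
    · rw [if_pos hb, if_pos hb, List.foldl_cons, pvApply_filter t]
      rfl
    · rw [if_neg hb, if_neg hb, pvApply_filter t]
      rfl

theorem pvBlocks_dropWhile : ∀ (t : List String),
    pvBlocks (t.dropWhile (fun l => !pvIsKey l)) = pvBlocks t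
  | [] => rfl
  | x :: t => by
    by_cases hx : pvIsKey x = true
    · simp [hx]
    · have hx' : pvIsKey x = false := by simpa using hx
      have hd : (x :: t).dropWhile (fun l => !pvIsKey l) = t.dropWhile (fun l => !pvIsKey l) := by
        simp [hx']
      rw [hd, pvBlocks_dropWhile t]
      simp [pvBlocks, hx']

theorem pvBlocks_cons_key (l : String) (t : List String) (h : pvIsKey l = true)
    (a b : String) (hs : PySem.Str.splitMax? l ":" 1 = some [a, b]) :
    pvBlocks (l :: t) =
      (pvNormKey a, PySem.Str.join "\n" ([PySem.Str.strip b] ++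
        pvStrips (t.takeWhile (fun l => !pvIsKey l)))) :: pvBlocks t := by
  rw [pvBlocks, if_pos h, hs, pvBlocks_dropWhile t]
  rfl

-- main invariant, mid-block: A's remaining run from state (d, some k, cv) equals flushing
-- the open block (cv plus the upcoming continuation lines) then applying the later blocks
theorem pvRunA_some (ls : List String) : ∀ (d : PySem.Dict String String) (k : String)
    (cv : List String),
    pvRunA ls (d, some k, cv) =
      pvApply (pvFlush' d k (cv ++ pvStrips (ls.takeWhile (fun l => !pvIsKey l))))
        (pvBlocks ls) := by
  induction ls with
  | nil =>
    intro d k cv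
    simp [pvRunA, pvFlushA, pvFlush', pvStrips, pvBlocks, pvApply]
  | cons l t ih =>
    intro d k cv
    by_cases hk : pvIsKey l = true
    · obtain ⟨a, b, hs⟩ := pvSplit_shape l hk
      have hstep : pvStepA (d, some k, cv) l =
          (pvFlush' d k cv, some (pvNormKey a), [PySem.Str.strip b]) := by
        simp [pvStepA, hk, hs, pvFlushA, pvFlush']
      rw [pvRunA, List.foldl_cons, hstep]
      have h2 := ih (pvFlush' d k cv) (pvNormKey a) [PySem.Str.strip b]
      rw [pvRunA] at h2
      rw [h2, pvBlocks_cons_key l t hk a b hs]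
      simp [hk, pvStrips, pvApply, pvFlush']
    · have hk' : pvIsKey l = false := by simpa using hk
      have htw : (l :: t).takeWhile (fun l => !pvIsKey l) =
          l :: t.takeWhile (fun l => !pvIsKey l) := by
        simp [hk']
      have hbl : pvBlocks (l :: t) = pvBlocks t := by simp [pvBlocks, hk']
      rw [hbl, htw]
      by_cases hstrip : (PySem.Str.strip l != "") = true
      · have hstrips : pvStrips (l :: t.takeWhile (fun l => !pvIsKey l)) =
            PySem.Str.strip l :: pvStrips (t.takeWhile (fun l => !pvIsKey l)) := by
          simp [pvStrips, hstrip]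
        by_cases hke : (k != "") = true
        · have hstep : pvStepA (d, some k, cv) l =
              (d, some k, cv ++ [PySem.Str.strip l]) := by
            simp [pvStepA, hk', hstrip, hke]
          rw [pvRunA, List.foldl_cons, hstep]
          have h2 := ih d k (cv ++ [PySem.Str.strip l])
          rw [pvRunA] at h2
          rw [h2, hstrips]
          simp
        · have hke' : k = "" := by simpa using hke
          have hstep : pvStepA (d, some k, cv) l = (d, some k, cv) := by
            simp [pvStepA, hk', hstrip, hke]
          rw [pvRunA, List.foldl_cons, hstep]
          have h2 := ih d k cv
          rw [pvRunA] at h2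
          rw [h2, hstrips]
          simp [pvFlush', hke']
      · have hstrips : pvStrips (l :: t.takeWhile (fun l => !pvIsKey l)) =
            pvStrips (t.takeWhile (fun l => !pvIsKey l)) := by
          simp only [Bool.not_eq_true] at hstrip
          simp [pvStrips, hstrip]
        have hstep : pvStepA (d, some k, cv) l = (d, some k, cv) := by
          simp [pvStepA, hk', hstrip]
        rw [pvRunA, List.foldl_cons, hstep]
        have h2 := ih d k cv
        rw [pvRunA] at h2
        rw [h2, hstrips]

-- before the first key line: A's run from the initial state equals applying all blocks
theorem pvRunA_none (ls : List String) : ∀ (d : PySem.Dict String String),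
    pvRunA ls (d, none, []) = pvApply d (pvBlocks ls) := by
  induction ls with
  | nil => intro d; simp [pvRunA, pvFlushA, pvBlocks, pvApply]
  | cons l t ih =>
    intro d
    by_cases hk : pvIsKey l = true
    · obtain ⟨a, b, hs⟩ := pvSplit_shape l hk
      have hstep : pvStepA (d, none, []) l =
          (d, some (pvNormKey a), [PySem.Str.strip b]) := by
        simp [pvStepA, hk, hs, pvFlushA]
      rw [pvRunA, List.foldl_cons, hstep]
      have h2 := pvRunA_some t d (pvNormKey a) [PySem.Str.strip b]
      rw [pvRunA] at h2
      rw [h2, pvBlocks_cons_key l t hk a b hs]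
      simp [pvApply, pvFlush']
    · have hk' : pvIsKey l = false := by simpa using hk
      have hstep : pvStepA (d, none, []) l = (d, none, []) := by
        by_cases hstrip : (PySem.Str.strip l != "") = true <;>
          simp [pvStepA, hk', hstrip]
      have hbl : pvBlocks (l :: t) = pvBlocks t := by simp [pvBlocks, hk']
      rw [pvRunA, List.foldl_cons, hstep, hbl]
      exact ih d

-- ===== VERDICT (by name: the statement is the Claim_ definition above) =====
theorem parse_section_data_spec : Claim_equal_parse_section_data := by
  intro section_ _
  unfold Spec_parse_section_data
  simp only [parse_section_data, parse_section_data_alt]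
  rw [pvApply_filter]
  have h2 := pvRunA_none
    (((PySem.Str.split? (PySem.Str.strip section_) "\n").getD []).drop 1)
    (PySem.Dict.mk [])
  rw [pvRunA] at h2
  exact congrArg PySem.Dict.items h2
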